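-- pv_equiv track=rewrite | github.com/Lewandodev/Basic-algorithms | Perfect numbers checker.py | find_perfnumbs_opt
-- ===== SOURCE A (Python) =====
-- def is_perfect(n):
--     divisors_sum=0
--     divisors=[]
--     for i in range(1,(n//2)+1):
--         #while looking for divisors we can skip all the numbers that are bigger than our number divided by 2 they will never be divisors
--         if n%i==0:
--             divisors.append(i)
--
--     for cyfyr_dzielników in divisors:
--         divisors_sum+=cyfyr_dzielników
--     #otrzymane dzielniki dodajemy w ceku zweryfikowania czy ich suma dałaby nam liczbę doskonałą
--     if divisors_sum==n:
--         return True
--     else: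
--         return False
--
-- def find_perfnumbs_opt(rangee):
--     list_of_perfs=[]
--     for numbs in range(6,rangee+1): #or we use range(6,range+1,2) with step (2) in order to don't use the if function
--         if numbs%2==0:    #in optimized version we skip all the odd numbers fastening up our running time
--             if is_perfect(numbs)==True:
--                 list_of_perfs.append(numbs)
--         else:
--             continue
--     return list_of_perfs
-- ===== SOURCE B (Python) =====
-- def _proper_sum(n):
--     # sum of proper divisors, pairing each small divisor with its cofactor
--     total = 1
--     i = 2
--     while i * i <= n:
--         if n % i == 0:
--             total += i
--             q = n // i
--             if q != i:
--                 total += q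
--         i += 1
--     return total
--
-- def find_perfnumbs_opt(rangee):
--     result = []
--     n = 6
--     while n <= rangee:
--         if _proper_sum(n) == n:
--             result.append(n)
--         n += 2
--     return result
-- ===== Notes on version B (the rewrite author's own statement) =====
-- stated objective: faster
-- what changed: Per candidate, B sums proper divisors by pairing each divisor up to the square root with its cofactor in a single while-loop, and steps through even candidates directly, instead of A's scan of every potential divisor up to half the candidate followed by a second summation pass.
import Mathlib
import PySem

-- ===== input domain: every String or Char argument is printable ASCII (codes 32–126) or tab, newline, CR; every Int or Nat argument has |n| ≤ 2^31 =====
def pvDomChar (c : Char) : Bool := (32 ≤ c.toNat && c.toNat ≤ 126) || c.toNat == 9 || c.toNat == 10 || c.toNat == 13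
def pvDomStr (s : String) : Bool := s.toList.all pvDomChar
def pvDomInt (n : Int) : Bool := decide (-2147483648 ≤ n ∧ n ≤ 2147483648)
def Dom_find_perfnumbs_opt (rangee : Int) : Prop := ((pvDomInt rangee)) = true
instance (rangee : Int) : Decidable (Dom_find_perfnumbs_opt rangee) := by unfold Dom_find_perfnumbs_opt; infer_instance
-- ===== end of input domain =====

-- B replaces A's per-candidate divisor scan up to n//2 (plus a second summation pass) by a
-- sqrt(n) divisor-pairing loop and steps through even candidates directly (objective: faster).


-- ===== PORT A =====
def is_perfect (n : Int) : Bool :=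
  let divisors : List Int :=
    (PySem.List.pyRange 1 (PySem.Int.floordiv n 2 + 1)).foldl
      (fun ds i => if PySem.Int.mod n i == 0 then ds ++ [i] else ds) []
  let divisors_sum : Int := divisors.foldl (fun s c => s + c) 0
  if divisors_sum == n then true else false

def find_perfnumbs_opt (rangee : Int) : List Int :=
  (PySem.List.pyRange 6 (rangee + 1)).foldl
    (fun acc numbs =>
      if PySem.Int.mod numbs 2 == 0 then
        (if is_perfect numbs == true then acc ++ [numbs] else acc)
      else acc) []

-- ===== PORT B =====
-- port of Source B's _proper_sum while-loop
def properSumLoop (n total i : Int) : Int :=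
  if _h : i * i ≤ n then
    let total' :=
      if PySem.Int.mod n i == 0 then
        let q := PySem.Int.floordiv n i
        if q != i then total + i + q else total + i
      else total
    properSumLoop n total' (i + 1)
  else total
termination_by (n + 1 - i).toNat
decreasing_by
  have hi : i ≤ n := by nlinarith [mul_self_nonneg i]
  omega

-- port of Source B's while-loop over even candidates
def perfLoop (rangee : Int) (result : List Int) (n : Int) : List Int :=
  if _h : n ≤ rangee then
    perfLoop rangee (if properSumLoop n 1 2 == n then result ++ [n] else result) (n + 2)
  else result
termination_by (rangee + 1 - n).toNat
decreasing_by omega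

def find_perfnumbs_opt_alt (rangee : Int) : List Int :=
  perfLoop rangee [] 6

-- ===== PRECONDITION & SPEC =====
def Spec_find_perfnumbs_opt (rangee : Int) (out : List Int) : Prop := out = find_perfnumbs_opt_alt rangee
instance (rangee : Int) (out : List Int) : Decidable (Spec_find_perfnumbs_opt rangee out) := by unfold Spec_find_perfnumbs_opt; infer_instance

-- ===== CLAIM (what is proved, stated in full; the proofs are below) =====
def Claim_equal_find_perfnumbs_opt : Prop := ∀ (rangee : Int), Dom_find_perfnumbs_opt rangee → Spec_find_perfnumbs_opt rangee (find_perfnumbs_opt rangee)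

-- ===== LEMMAS AND PROOFS =====

-- the Bool predicate A's outer loop filters with
def predA (m : Int) : Bool := (PySem.Int.mod m 2 == 0) && (is_perfect m == true)
-- the Bool predicate B's loop effectively filters with
def predB (m : Int) : Bool := (PySem.Int.mod m 2 == 0) && (properSumLoop m 1 2 == m)
-- the summand of the sqrt-pairing sum
def pairC (N j : Nat) : Int :=
  if j ∣ N then (j : Int) + (if N / j ≠ j then ((N / j : Nat) : Int) else 0) else 0

-- A's fold over range(6, r+1) is a filter
lemma A_eq_filter (r : Int) :
    find_perfnumbs_opt r = (PySem.List.pyRange 6 (r + 1)).filter predA := by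
  unfold find_perfnumbs_opt
  have hf : (fun (acc : List Int) numbs =>
      if PySem.Int.mod numbs 2 == 0 then
        (if is_perfect numbs == true then acc ++ [numbs] else acc)
      else acc)
      = (fun acc x => if predA x then acc ++ [(fun y => y) x] else acc) := by
    funext acc x
    unfold predA
    cases h1 : (PySem.Int.mod x 2 == 0) <;> cases h2 : (is_perfect x == true) <;> simp
  rw [hf, PySem.List.foldl_append_if predA (fun y => y)]
  simp

-- A's divisor-collecting loop, summed: a Finset sum over 1..M
lemma sumA_eq (N : Nat) : ∀ (M : Nat),
    (((PySem.List.pyRange 1 ((M : Int) + 1)).filter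
        (fun i => PySem.Int.mod (N : Int) i == 0)).map id).sum
      = ∑ i ∈ Finset.Icc 1 M, (if i ∣ N then (i : Int) else 0) := by
  intro M
  induction M with
  | zero => simp [PySem.List.pyRange_one_eq_nil]
  | succ M ih =>
    have hcast : ((M + 1 : Nat) : Int) + 1 = ((M : Int) + 1) + 1 := by push_cast; ring
    rw [hcast, PySem.List.pyRange_one_succ_right (by omega),
        List.filter_append, List.map_append, List.sum_append, ih,
        Finset.sum_Icc_succ_top (by omega)]
    have hmod : PySem.Int.mod (N : Int) ((M : Int) + 1) = ((N % (M + 1) : Nat) : Int) := by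
      have := PySem.Int.mod_natCast N (M + 1)
      push_cast at this ⊢
      exact this
    simp only [List.filter_cons, List.filter_nil, hmod]
    have hDvd : ((M : Int) + 1 ∣ (N : Int)) ↔ (M + 1) ∣ N := by
      constructor <;> intro h <;> exact_mod_cast h
    by_cases hd : (M + 1) ∣ N <;> simp [hDvd, hd]

-- B's while-loop stops once i exceeds sqrt N
lemma properSumLoop_stop (N i : Nat) (t : Int) (h : Nat.sqrt N < i) :
    properSumLoop (N : Int) t (i : Int) = t := by
  rw [properSumLoop]
  have : ¬ ((i : Int) * (i : Int) ≤ (N : Int)) := by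
    have : ¬ (i * i ≤ N) := fun hle => absurd (Nat.le_sqrt.mpr hle) (by omega)
    exact_mod_cast this
  simp [this]

-- B's while-loop computes the tail of the sqrt-pairing sum
lemma properSumLoop_eq (N : Nat) : ∀ (k : Nat), ∀ (i : Nat) (t : Int),
    Nat.sqrt N + 1 - i ≤ k → 1 ≤ i →
    properSumLoop (N : Int) t (i : Int)
      = t + ∑ j ∈ Finset.Ico i (Nat.sqrt N + 1), pairC N j := by
  intro k
  induction k with
  | zero =>
    intro i t hk hi
    rw [properSumLoop_stop N i t (by omega), Finset.Ico_eq_empty (by omega)]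
    simp
  | succ k ih =>
    intro i t hk hi
    by_cases hle : i ≤ Nat.sqrt N
    · have hii : ((i : Int) * (i : Int) ≤ (N : Int)) := by
        exact_mod_cast Nat.le_sqrt.mp hle
      have hmod : PySem.Int.mod (N : Int) (i : Int) = ((N % i : Nat) : Int) :=
        PySem.Int.mod_natCast N i
      have hdiv : PySem.Int.floordiv (N : Int) (i : Int) = ((N / i : Nat) : Int) :=
        PySem.Int.floordiv_natCast N i
      have key : ∀ t' : Int, properSumLoop (N : Int) t' ((i : Int) + 1)
          = t' + ∑ j ∈ Finset.Ico (i + 1) (Nat.sqrt N + 1), pairC N j := by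
        intro t'
        have hcast : ((i : Int) + 1) = ((i + 1 : Nat) : Int) := by push_cast; ring
        rw [hcast]
        exact ih (i + 1) t' (by omega) (by omega)
      rw [properSumLoop, dif_pos hii]
      rw [key]
      conv_rhs => rw [Finset.sum_eq_sum_Ico_succ_bot (by omega) (pairC N)]
      rw [hmod, hdiv]
      unfold pairC
      by_cases hd : i ∣ N
      · have hdInt : ((i : Int)) ∣ ((N : Int)) := Int.natCast_dvd_natCast.mpr hd
        by_cases hq : N / i = i
        · have hqInt : ((N : Int)) / ((i : Int)) = (i : Int) := by
            rw [← Int.natCast_ediv]; exact_mod_cast hq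
          simp [hdInt, hqInt, hd, hq]
          ring
        · have hqInt : ((N : Int)) / ((i : Int)) ≠ (i : Int) := by
            rw [← Int.natCast_ediv]; exact_mod_cast hq
          simp [hdInt, hqInt, hd, hq]
          ring
      · have hdInt : ¬ ((i : Int)) ∣ ((N : Int)) := fun h => hd (Int.natCast_dvd_natCast.mp h)
        simp [hdInt, hd]
    · rw [properSumLoop_stop N i t (by omega), Finset.Ico_eq_empty (by omega)]
      simp

-- a proper divisor's cofactor is at least 2
lemma cofactor_two_le {N d : Nat} (hN : 2 ≤ N) (hd : d ∣ N) (hlt : d < N) : 2 ≤ N / d := by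
  have hd0 : 0 < d := by
    rcases Nat.eq_zero_or_pos d with h | h
    · subst h; simp at hd; omega
    · exact h
  obtain ⟨k, hk⟩ := hd
  have hkd : N / d = k := by rw [hk, Nat.mul_div_cancel_left _ hd0]
  rcases k with _ | _ | k <;> omega

-- the cofactor of a divisor above sqrt N is at most sqrt N
lemma div_le_sqrt {N d : Nat} (hd : d ∣ N) (hbig : Nat.sqrt N < d) : N / d ≤ Nat.sqrt N := by
  have hd0 : 0 < d := lt_of_le_of_lt (Nat.zero_le _) hbig
  have h1 : N / d < Nat.sqrt N + 1 := by
    rw [Nat.div_lt_iff_lt_mul hd0]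
    calc N < (Nat.sqrt N + 1) * (Nat.sqrt N + 1) := Nat.lt_succ_sqrt N
      _ ≤ (Nat.sqrt N + 1) * d := Nat.mul_le_mul_left _ hbig
  omega

-- the cofactor of a divisor ≤ sqrt N that is not its own cofactor lies above sqrt N
lemma sqrt_lt_div {N j : Nat} (hj : j ∣ N) (h2j : 2 ≤ j) (hjs : j ≤ Nat.sqrt N)
    (hne : N / j ≠ j) : Nat.sqrt N < N / j := by
  by_contra hcon
  push_neg at hcon
  set s := Nat.sqrt N with hsdef
  set q := N / j with hqdef
  have hs0 : 0 < s := by omega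
  have hmul : j * q = N := Nat.mul_div_cancel' hj
  have hlow : s * s ≤ N := by
    have := Nat.sqrt_le' N
    calc s * s = s ^ 2 := (pow_two _).symm
      _ ≤ N := this
  have hup : N ≤ s * s := by
    calc N = j * q := hmul.symm
      _ ≤ s * s := Nat.mul_le_mul hjs hcon
  have hNss : j * q = s * s := by rw [hmul]; omega
  have hjseq : j = s := by
    by_contra hne2
    have hlt : j < s := lt_of_le_of_ne hjs hne2
    have : j * q < s * s := by
      calc j * q ≤ j * s := Nat.mul_le_mul_left _ hcon
        _ < s * s := (Nat.mul_lt_mul_right hs0).mpr hlt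
    omega
  have hss : s * q = s * s := hjseq ▸ hNss
  have := Nat.eq_of_mul_eq_mul_left hs0 hss
  omega

-- the pairing identity: proper-divisor sum up to N/2 = 1 + sqrt-paired sum
lemma core_pairing (N : Nat) (h2 : 2 ≤ N) :
    (∑ i ∈ Finset.Icc 1 (N / 2), (if i ∣ N then (i : Int) else 0))
      = 1 + ∑ j ∈ Finset.Ico 2 (Nat.sqrt N + 1), pairC N j := by
  have hN0 : N ≠ 0 := by omega
  have hs1 : 1 ≤ Nat.sqrt N := Nat.le_sqrt.mpr (by omega)
  have hsltN : Nat.sqrt N < N := Nat.sqrt_lt_self (by omega)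
  set s := Nat.sqrt N with hs
  set B2 : Finset Nat := (Finset.Ico 2 (s + 1)).filter (· ∣ N) with hB2
  set B2' : Finset Nat := B2.filter (fun j => N / j ≠ j) with hB2'
  -- LHS is the proper-divisor sum
  have hLHS : (∑ i ∈ Finset.Icc 1 (N / 2), (if i ∣ N then (i : Int) else 0))
      = ∑ i ∈ N.properDivisors, (i : Int) := by
    rw [← Finset.sum_filter]
    congr 1
    ext i
    simp only [Finset.mem_filter, Finset.mem_Icc, Nat.mem_properDivisors]
    constructor
    · rintro ⟨⟨h1, hhalf⟩, hdvd⟩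
      exact ⟨hdvd, lt_of_le_of_lt hhalf (Nat.div_lt_self (by omega) one_lt_two)⟩
    · rintro ⟨hdvd, hltN⟩
      have hi0 : i ≠ 0 := by
        rintro rfl
        simp at hdvd
        omega
      obtain ⟨k, hk⟩ := hdvd
      have hk2 : 2 ≤ k := by
        rcases k with _ | _ | k <;> omega
      refine ⟨⟨by omega, ?_⟩, ⟨k, hk⟩⟩
      rw [Nat.le_div_iff_mul_le (by omega)]
      calc i * 2 ≤ i * k := Nat.mul_le_mul_left _ hk2
        _ = N := hk.symm
  -- RHS splits into divisor part and cofactor part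
  have hRHS : (∑ j ∈ Finset.Ico 2 (s + 1), pairC N j)
      = (∑ j ∈ B2, (j : Int)) + ∑ j ∈ B2', ((N / j : Nat) : Int) := by
    unfold pairC
    rw [← Finset.sum_filter, ← hB2, Finset.sum_add_distrib, ← Finset.sum_filter, ← hB2']
  -- partition properDivisors at sqrt N
  have hsplit := Finset.sum_filter_add_sum_filter_not N.properDivisors
    (fun i => i ≤ s) (fun i => (i : Int))
  -- small part: {1} and the divisors in [2, sqrt N]
  have hone : 1 ∉ B2 := by simp [hB2]
  have hsmall : N.properDivisors.filter (fun i => i ≤ s) = insert 1 B2 := by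
    ext i
    simp only [Finset.mem_filter, Finset.mem_insert, Finset.mem_Ico,
      Nat.mem_properDivisors, hB2]
    constructor
    · rintro ⟨⟨hdvd, hltN⟩, hle⟩
      rcases Nat.lt_or_ge i 2 with h | h
      · left
        have : i ≠ 0 := by rintro rfl; simp at hdvd; omega
        omega
      · right; exact ⟨⟨h, by omega⟩, hdvd⟩
    · rintro (rfl | ⟨⟨ha, hb⟩, hdvd⟩)
      · exact ⟨⟨one_dvd N, by omega⟩, hs1⟩
      · exact ⟨⟨hdvd, by omega⟩, by omega⟩
  have hsmall_sum : (∑ i ∈ N.properDivisors.filter (fun i => i ≤ s), (i : Int))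
      = 1 + ∑ j ∈ B2, (j : Int) := by
    rw [hsmall, Finset.sum_insert hone]
    norm_num
  -- large part: the bijection d ↦ N / d with B2'
  have hbig : (∑ i ∈ N.properDivisors.filter (fun i => ¬ i ≤ s), (i : Int))
      = ∑ j ∈ B2', ((N / j : Nat) : Int) := by
    apply Finset.sum_nbij' (i := fun d => N / d) (j := fun j => N / j)
    · intro d hd
      simp only [Finset.mem_filter, Nat.mem_properDivisors, Finset.mem_Ico, hB2', hB2] at hd ⊢
      obtain ⟨⟨hdvd, hltN⟩, hbig⟩ := hd
      push_neg at hbig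
      have hDdvd : N / d ∣ N := Nat.div_dvd_of_dvd hdvd
      have h2d : 2 ≤ N / d := cofactor_two_le h2 hdvd hltN
      have hds : N / d ≤ s := div_le_sqrt hdvd hbig
      have hdd : N / (N / d) = d := Nat.div_div_self hdvd hN0
      refine ⟨⟨⟨h2d, by omega⟩, hDdvd⟩, ?_⟩
      rw [hdd]
      omega
    · intro j hj
      simp only [Finset.mem_filter, Nat.mem_properDivisors, Finset.mem_Ico, hB2', hB2] at hj ⊢
      obtain ⟨⟨⟨h2j, hjs⟩, hdvd⟩, hne⟩ := hj
      have hDdvd : N / j ∣ N := Nat.div_dvd_of_dvd hdvd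
      have hDlt : N / j < N := Nat.div_lt_self (by omega) (by omega)
      have hgt : s < N / j := sqrt_lt_div hdvd h2j (by omega) hne
      exact ⟨⟨hDdvd, hDlt⟩, by omega⟩
    · intro d hd
      simp only [Finset.mem_filter, Nat.mem_properDivisors] at hd
      exact Nat.div_div_self hd.1.1 hN0
    · intro j hj
      simp only [Finset.mem_filter, Finset.mem_Ico, hB2', hB2] at hj
      exact Nat.div_div_self hj.1.2 hN0
    · intro d hd
      simp only [Finset.mem_filter, Nat.mem_properDivisors] at hd
      rw [Nat.div_div_self hd.1.1 hN0]
  rw [hLHS, ← hsplit, hsmall_sum, hbig, hRHS]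
  ring

-- pointwise agreement of the two perfection tests on the candidates both loops visit
lemma pred_agree (m : Int) (hm : 2 ≤ m) : predA m = predB m := by
  obtain ⟨N, rfl⟩ : ∃ N : Nat, m = (N : Int) :=
    ⟨m.toNat, (Int.toNat_of_nonneg (by omega)).symm⟩
  have hN2 : 2 ≤ N := by exact_mod_cast hm
  have hsum : (((PySem.List.pyRange 1 (PySem.Int.floordiv (N : Int) 2 + 1)).foldl
        (fun ds i => if PySem.Int.mod (N : Int) i == 0 then ds ++ [i] else ds) []).foldl
        (fun s c => s + c) 0)
      = properSumLoop (N : Int) 1 2 := by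
    rw [PySem.List.foldl_append_if (fun i => PySem.Int.mod (N : Int) i == 0) (fun y => y),
        List.nil_append]
    rw [PySem.List.foldl_add _ (fun c => c) 0]
    have hfd : PySem.Int.floordiv (N : Int) 2 = ((N / 2 : Nat) : Int) := by
      have := PySem.Int.floordiv_natCast N 2
      push_cast at this ⊢
      exact this
    have h2c : ((2 : Nat) : Int) = (2 : Int) := by norm_num
    rw [hfd]
    have hA := sumA_eq N (N / 2)
    simp only [List.map_id, List.map_id', zero_add] at hA ⊢
    rw [hA, core_pairing N hN2, ← h2c,
        properSumLoop_eq N (Nat.sqrt N + 1) 2 1 (by omega) (by omega)]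
  unfold predA predB is_perfect
  simp only []
  rw [hsum]
  cases h : (properSumLoop (N : Int) 1 2 == (N : Int)) <;> simp

-- an odd number never passes B's effective predicate
lemma predB_odd (m : Int) (h : ¬ (2 : Int) ∣ m) : predB m = false := by
  unfold predB
  simp [h]

-- B's loop is a filter over the same range
lemma perfLoop_eq (r : Int) : ∀ (k : Nat) (n : Int) (acc : List Int),
    (r + 1 - n).toNat ≤ k → (2 : Int) ∣ n →
    perfLoop r acc n = acc ++ (PySem.List.pyRange n (r + 1)).filter predB := by
  intro k
  induction k with
  | zero =>
    intro n acc hk hn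
    rw [perfLoop, dif_neg (by omega), PySem.List.pyRange_one_eq_nil (by omega)]
    simp
  | succ k ih =>
    intro n acc hk hn
    by_cases hle : n ≤ r
    · have hk' : (r + 1 - (n + 2)).toNat ≤ k := by omega
      have hn' : (2 : Int) ∣ (n + 2) := hn.add (by norm_num)
      rw [perfLoop, dif_pos hle, ih (n + 2) _ hk' hn']
      have hmodn : PySem.Int.mod n 2 = 0 := (PySem.Int.mod_eq_zero_iff_dvd n 2).mpr hn
      have htail : (PySem.List.pyRange (n + 1) (r + 1)).filter predB
          = (PySem.List.pyRange (n + 2) (r + 1)).filter predB := by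
        by_cases hle2 : n + 1 ≤ r
        · rw [PySem.List.pyRange_one_cons (by omega), List.filter_cons,
              predB_odd (n + 1) (by omega)]
          have h11 : n + 1 + 1 = n + 2 := by ring
          rw [h11]
          simp
        · rw [PySem.List.pyRange_one_eq_nil (by omega),
              PySem.List.pyRange_one_eq_nil (by omega)]
      have hpredB : predB n = (properSumLoop n 1 2 == n) := by
        unfold predB
        rw [hmodn]
        simp
      conv_rhs => rw [PySem.List.pyRange_one_cons (show n < r + 1 by omega),
        List.filter_cons, htail, hpredB]
      cases hq : (properSumLoop n 1 2 == n) <;> simp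
    · rw [perfLoop, dif_neg hle, PySem.List.pyRange_one_eq_nil (by omega)]
      simp

-- ===== VERDICT (by name: the statement is the Claim_ definition above) =====
theorem find_perfnumbs_opt_spec : Claim_equal_find_perfnumbs_opt := by
  intro r _
  unfold Spec_find_perfnumbs_opt find_perfnumbs_opt_alt
  rw [A_eq_filter, perfLoop_eq r (r + 1 - 6).toNat 6 [] (by omega) (by decide), List.nil_append]
  exact List.filter_congr (fun m hm => by
    have h6 : (6 : Int) ≤ m := ((PySem.List.mem_pyRange_one).mp hm).1
    exact pred_agree m (by omega))
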